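-- pv_equiv track=rewrite | github.com/shreepranav/shreepranav_MLTP_Project_2021 | equality_logic_algorithms/bryant.py | contradictory_cycle
-- ===== SOURCE A (Python) =====
-- def find_path(graph, start, end, path=[]):
--     path = path + [start]
--     if start == end:
--         return path
--     if start not in graph.keys():
--         return None
--     for node in graph[start]:
--         if node not in path:
--             newpath = find_path(graph, node, end, path)
--             if newpath: return newpath
--     return None
--
-- def findedges(graph):
--     edges = []
--     for v in graph.keys():
--         for w in graph[v]:
--             if {v, w} not in edges:
--                 edges.append({v, w})
--     return edges
--
-- def contradictory_cycle(g1, g2):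
--     for e in findedges(g2):
--         if len(list(e)) == 1:
--             return list(e)
--         v, w = list(e)
--         if (find_path(g1, v, w) != None):
--             return find_path(g1, v, w)
--     return None
-- ===== SOURCE B (Python) =====
-- def find_path(graph, start, end):
--     # iterative leftmost-first DFS over simple paths, explicit stack instead of recursion
--     stack = [(start, [start])]
--     while stack:
--         node, path = stack.pop()
--         if node == end:
--             return path
--         if node not in graph:
--             continue
--         for nb in reversed(graph[node]):
--             if nb not in path:
--                 stack.append((nb, path + [nb]))
--     return None
--
-- def findedges(graph):
--     edges = []
--     for v in graph.keys():
--         for w in graph[v]: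
--             if {v, w} not in edges:
--                 edges.append({v, w})
--     return edges
--
-- def contradictory_cycle(g1, g2):
--     for e in findedges(g2):
--         le = list(e)
--         if len(le) == 1:
--             return le
--         v, w = le
--         p = find_path(g1, v, w)
--         if p is not None:
--             return p
--     return None
-- ===== Notes on version B (the rewrite author's own statement) =====
-- stated objective: alternative
-- what changed: find_path is re-implemented as an iterative depth-first search with an explicit stack of (node, path) pairs (neighbours pushed in reverse so the leftmost-first simple-path order of the recursion is reproduced) instead of recursion, and contradictory_cycle computes each path query once instead of twice.
import Mathlib
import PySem

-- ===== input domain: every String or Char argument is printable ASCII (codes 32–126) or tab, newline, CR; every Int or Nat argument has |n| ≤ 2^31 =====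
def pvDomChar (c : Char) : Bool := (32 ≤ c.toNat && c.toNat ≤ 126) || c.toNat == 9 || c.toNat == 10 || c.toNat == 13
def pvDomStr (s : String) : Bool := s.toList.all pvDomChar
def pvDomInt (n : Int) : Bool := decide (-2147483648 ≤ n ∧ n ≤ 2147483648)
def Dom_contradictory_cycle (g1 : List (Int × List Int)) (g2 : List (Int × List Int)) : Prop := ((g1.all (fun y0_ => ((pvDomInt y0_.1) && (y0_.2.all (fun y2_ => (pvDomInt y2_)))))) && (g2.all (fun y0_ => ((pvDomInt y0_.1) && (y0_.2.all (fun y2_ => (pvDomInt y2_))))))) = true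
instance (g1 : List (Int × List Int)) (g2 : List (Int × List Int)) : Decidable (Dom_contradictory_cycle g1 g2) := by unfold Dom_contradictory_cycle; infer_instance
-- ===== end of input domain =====

-- B replaces the recursive find_path by an iterative explicit-stack DFS (same leftmost-first
-- simple-path order) and computes each path query once instead of twice; return values proved equal.

-- ===== PORT A =====
-- CPython small-int hash (exact for |n| ≤ 2^31: hash(n) = n except hash(-1) = -2), as unsigned 64-bit
def pyHash (n : Int) : Nat := ((if n = -1 then (-2 : Int) else n) % (18446744073709551616 : Int)).toNat

-- CPython set open-addressing probe in the fresh 8-slot table built for a literal {v, w}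
-- (perturb >>= 5 then i = (5*i + 1 + perturb) & 7); fuel 100 is unreachable (the walk cycles all slots)
def pySetProbe : Nat → Nat → Nat → Nat → Nat
  | 0, j, _, _ => j
  | f + 1, j, perturb, iv =>
    if j = iv then
      let p := perturb >>> 5
      pySetProbe f ((5 * j + 1 + p) % 8) p iv
    else j

-- list({v, w}) for the literal that inserts v then w: exact CPython iteration order
def pyPairList (v w : Int) : List Int :=
  if v = w then [v]
  else
    let iv := pyHash v % 8
    let jw := pySetProbe 100 (pyHash w % 8) (pyHash w) iv
    if iv < jw then [v, w] else [w, v]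

-- findedges: edges kept as the list(e) order of the Python set; '{v,w} not in edges' is set equality
def findedges (graph : List (Int × List Int)) : List (List Int) :=
  let d := PySem.Dict.ofList graph
  d.keys.foldl (fun edges v =>
    (d.getD v []).foldl (fun edges w =>
      let e := pyPairList v w
      if edges.any (fun e' => e' == e || e' == e.reverse) then edges else edges ++ [e]) edges) []

-- total length of the adjacency lists of the (deduplicated) dict: an upper bound on the
-- recursion depth of find_path, used only as the totality fuel of the port
def sumLen (g : List (Int × List Int)) : Nat :=
  ((PySem.Dict.ofList g).items.flatMap (fun p => p.2)).length

-- recursive find_path of A, fuel only guards totality (never reached at fuel sumLen+1)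
def findPathA (graph : List (Int × List Int)) : Nat → Int → Int → List Int → Option (List Int)
  | 0, start, stop, path0 =>
    if start = stop then some (path0 ++ [start]) else none
  | f + 1, start, stop, path0 =>
    let path := path0 ++ [start]
    if start = stop then some path
    else
      match (PySem.Dict.ofList graph).get? start with
      | none => none
      | some nbrs =>
        nbrs.findSome? (fun node => if node ∈ path then none else findPathA graph f node stop path)

def contradictory_cycle (g1 : List (Int × List Int)) (g2 : List (Int × List Int)) : Option (List Int) :=
  (findedges g2).findSome? (fun e =>
    if e.length = 1 then some e
    else
      match e with
      | [v, w] =>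
        -- A calls find_path twice; both calls are the same pure value
        if findPathA g1 (sumLen g1 + 1) v w [] ≠ none then findPathA g1 (sumLen g1 + 1) v w []
        else none
      | _ => none)

-- ===== PORT B =====
-- B's own copies of the helpers its source shares with A (no definition is shared between the ports)
def pyHashB (n : Int) : Nat := ((if n = -1 then (-2 : Int) else n) % (18446744073709551616 : Int)).toNat

def pySetProbeB : Nat → Nat → Nat → Nat → Nat
  | f + 1, j, perturb, iv =>
    if j = iv then
      let p := perturb >>> 5
      pySetProbeB f ((5 * j + 1 + p) % 8) p iv
    else j
  | 0, j, _, _ => j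

def pyPairListB (v w : Int) : List Int :=
  if v = w then [v]
  else
    let iv := pyHashB v % 8
    let jw := pySetProbeB 100 (pyHashB w % 8) (pyHashB w) iv
    if iv < jw then [v, w] else [w, v]

def findedgesB (graph : List (Int × List Int)) : List (List Int) :=
  let d := PySem.Dict.ofList graph
  d.keys.foldl (fun edges v =>
    (d.getD v []).foldl (fun edges w =>
      let e := pyPairListB v w
      if edges.any (fun e' => e' == e || e' == e.reverse) then edges else edges ++ [e]) edges) []

def sumLenB (g : List (Int × List Int)) : Nat :=
  ((PySem.Dict.ofList g).items.flatMap (fun p => p.2)).length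

-- push the neighbours in reversed order (Python's 'for nb in reversed(graph[node])')
def pushRev (path : List Int) (st : List (Int × List Int)) (nbrs : List Int) : List (Int × List Int) :=
  nbrs.reverse.foldl (fun st nb => if nb ∈ path then st else (nb, path ++ [nb]) :: st) st

-- totality fuel for the stack loop (bounds the number of pops; never reached)
def bigFuel (g : List (Int × List Int)) : Nat := (sumLenB g + 2) ^ (sumLenB g + 2)

-- the while-stack loop of B's find_path
def runStack (graph : List (Int × List Int)) (stop : Int) : Nat → List (Int × List Int) → Option (List Int)
  | 0, _ => none
  | _ + 1, [] => none
  | f + 1, (node, path) :: rest =>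
    if node = stop then some path
    else if (PySem.Dict.ofList graph).contains node = false then
      -- Python B: 'if node not in graph: continue'
      runStack graph stop f rest
    else
      runStack graph stop f (pushRev path rest ((PySem.Dict.ofList graph).getD node []))

def findPathB (graph : List (Int × List Int)) (start stop : Int) : Option (List Int) :=
  runStack graph stop (bigFuel graph) [(start, [start])]

def contradictory_cycle_alt (g1 : List (Int × List Int)) (g2 : List (Int × List Int)) : Option (List Int) :=
  (findedgesB g2).findSome? (fun e =>
    if e.length = 1 then some e
    else
      match e with
      | [] => none
      | [_] => none
      | v :: w :: _ => findPathB g1 v w)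

-- ===== PRECONDITION & SPEC =====
def Spec_contradictory_cycle (g1 : List (Int × List Int)) (g2 : List (Int × List Int)) (out : Option (List Int)) : Prop := out = contradictory_cycle_alt g1 g2
instance (g1 : List (Int × List Int)) (g2 : List (Int × List Int)) (out : Option (List Int)) : Decidable (Spec_contradictory_cycle g1 g2 out) := by unfold Spec_contradictory_cycle; infer_instance

-- ===== CLAIM (what is proved, stated in full; the proofs are below) =====
def Claim_equal_contradictory_cycle : Prop := ∀ (g1 : List (Int × List Int)) (g2 : List (Int × List Int)), Dom_contradictory_cycle g1 g2 → Spec_contradictory_cycle g1 g2 (contradictory_cycle g1 g2)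

-- ===== LEMMAS AND PROOFS =====

-- all adjacency values of the dict
def flatVals (g : List (Int × List Int)) : List Int :=
  (PySem.Dict.ofList g).items.flatMap (fun p => p.2)

-- measure: distinct adjacency values not yet on the path
def pvM (g : List (Int × List Int)) (path : List Int) : Nat :=
  ((flatVals g).dedup.filter (fun x => decide (¬ x ∈ path))).length

-- exact number of pops B's stack loop spends on the subtree rooted at (n, path0 ++ [n])
-- when the answer there is none (mirrors findPathA; proof-side only)
def cost (g : List (Int × List Int)) (stop : Int) : Nat → Int → List Int → Nat
  | 0, _, _ => 1
  | f + 1, n, path0 =>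
    let pn := path0 ++ [n]
    if n = stop then 1
    else
      match (PySem.Dict.ofList g).get? n with
      | none => 1
      | some nbrs =>
        1 + ((nbrs.filter (fun x => decide (¬ x ∈ pn))).map (fun nb => cost g stop f nb pn)).sum

lemma get?_ofList_mem_items {g : List (Int × List Int)} {k : Int} {v : List Int}
    (h : (PySem.Dict.ofList g).get? k = some v) : (k, v) ∈ (PySem.Dict.ofList g).items :=
  PySem.Dict.mem_items_of_get?_eq_some _ h

lemma mem_flatVals {g : List (Int × List Int)} {k : Int} {v : List Int}
    (h : (PySem.Dict.ofList g).get? k = some v) {x : Int} (hx : x ∈ v) : x ∈ flatVals g := by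
  unfold flatVals
  exact List.mem_flatMap.2 ⟨(k, v), get?_ofList_mem_items h, hx⟩

lemma len_le_sumLen {g : List (Int × List Int)} {k : Int} {v : List Int}
    (h : (PySem.Dict.ofList g).get? k = some v) : v.length ≤ sumLen g := by
  have hm := get?_ofList_mem_items h
  unfold sumLen
  rw [List.length_flatMap]
  have : v.length ∈ ((PySem.Dict.ofList g).items.map (fun p => p.2.length)) :=
    List.mem_map.2 ⟨(k, v), hm, rfl⟩
  exact List.single_le_sum (fun x _ => Nat.zero_le x) _ this

lemma filter_sublist_of_imp {l : List Int} {p q : Int → Bool}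
    (himp : ∀ x, q x = true → p x = true) : List.Sublist (l.filter q) (l.filter p) := by
  induction l with
  | nil => simp
  | cons c u ihu =>
    by_cases hq : q c = true
    · have hp := himp c hq
      simpa [List.filter_cons, hq, hp] using ihu.cons₂ c
    · have hq' : q c = false := by simpa using hq
      by_cases hp : p c = true
      · simpa [List.filter_cons, hq', hp] using ihu.cons c
      · have hp' : p c = false := by simpa using hp
        simpa [List.filter_cons, hq', hp'] using ihu

lemma filter_length_lt {l : List Int} {p q : Int → Bool}
    (himp : ∀ x, q x = true → p x = true) {a : Int} (ha : a ∈ l)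
    (hpa : p a = true) (hqa : q a = false) :
    (l.filter q).length < (l.filter p).length := by
  induction l with
  | nil => cases ha
  | cons b t ih =>
    rcases List.mem_cons.1 ha with rfl | hb
    · simp only [List.filter_cons, hpa, hqa, if_true, if_false, List.length_cons]
      exact Nat.lt_succ_of_le (filter_sublist_of_imp himp).length_le
    · by_cases hq : q b = true
      · have hp := himp b hq
        simpa [List.filter_cons, hq, hp] using Nat.succ_lt_succ (ih hb)
      · have hq' : q b = false := by simpa using hq
        by_cases hp : p b = true
        · simp only [List.filter_cons, hq', hp, if_true, if_false, List.length_cons]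
          exact Nat.lt_succ_of_lt (ih hb)
        · have hp' : p b = false := by simpa using hp
          simpa [List.filter_cons, hq', hp'] using ih hb

lemma pvM_decrease {g : List (Int × List Int)} {pn : List Int} {nb : Int}
    (hmem : nb ∈ flatVals g) (hnp : nb ∉ pn) : pvM g (pn ++ [nb]) < pvM g pn := by
  unfold pvM
  apply filter_length_lt (a := nb)
  · intro x hx
    simp only [decide_eq_true_eq] at hx ⊢
    intro hxm
    exact hx (List.mem_append.2 (Or.inl hxm))
  · exact List.mem_dedup.2 hmem
  · simpa using hnp
  · simp

lemma pushRev_eq (path : List Int) (st : List (Int × List Int)) (nbrs : List Int) :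
    pushRev path st nbrs
      = (nbrs.filter (fun x => decide (¬ x ∈ path))).map (fun nb => (nb, path ++ [nb])) ++ st := by
  induction nbrs with
  | nil => simp [pushRev]
  | cons a l ih =>
    unfold pushRev at ih ⊢
    rw [List.reverse_cons, List.foldl_append, ih]
    by_cases h : a ∈ path <;> simp [List.filter, h]

lemma runStack_nil (g : List (Int × List Int)) (stop : Int) (f : Nat) :
    runStack g stop f [] = none := by
  cases f <;> simp [runStack]

lemma findSome?_congr {α β : Type} {f h : α → Option β} (l : List α)
    (he : ∀ x ∈ l, f x = h x) : l.findSome? f = l.findSome? h := by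
  induction l with
  | nil => rfl
  | cons a t ih =>
    simp only [List.findSome?_cons, he a (List.mem_cons_self ..)]
    cases h a <;> simp [ih fun x hx => he x (List.mem_cons_of_mem _ hx)]

lemma cost_le (g : List (Int × List Int)) (stop : Int) :
    ∀ (fA : Nat) (n : Int) (path0 : List Int),
      cost g stop fA n path0 ≤ (sumLen g + 1) ^ (fA + 1) := by
  intro fA
  induction fA with
  | zero => intro n p; simpa [cost] using Nat.one_le_pow _ _ (Nat.succ_pos _)
  | succ f ih =>
    intro n p
    unfold cost
    by_cases hstop : n = stop
    · simpa [hstop] using Nat.one_le_pow _ _ (Nat.succ_pos _)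
    · simp only [hstop, if_false]
      cases hg : (PySem.Dict.ofList g).get? n with
      | none => exact Nat.one_le_pow _ _ (Nat.succ_pos _)
      | some nbrs =>
        have hsum : (((nbrs.filter (fun x => decide (¬ x ∈ p ++ [n]))).map
            (fun nb => cost g stop f nb (p ++ [n]))).sum)
            ≤ sumLen g * (sumLen g + 1) ^ (f + 1) := by
          have hb : ∀ y ∈ (nbrs.filter (fun x => decide (¬ x ∈ p ++ [n]))).map
              (fun nb => cost g stop f nb (p ++ [n])), y ≤ (sumLen g + 1) ^ (f + 1) := by
            intro y hy
            rcases List.mem_map.1 hy with ⟨nb, _, rfl⟩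
            exact ih nb (p ++ [n])
          have := List.sum_le_card_nsmul _ _ hb
          rw [smul_eq_mul, List.length_map] at this
          calc ((nbrs.filter (fun x => decide (¬ x ∈ p ++ [n]))).map
                (fun nb => cost g stop f nb (p ++ [n]))).sum
              ≤ (nbrs.filter (fun x => decide (¬ x ∈ p ++ [n]))).length * (sumLen g + 1) ^ (f + 1) := this
            _ ≤ sumLen g * (sumLen g + 1) ^ (f + 1) := by
                exact Nat.mul_le_mul_right _ ((List.length_filter_le _ _).trans (len_le_sumLen hg))
        calc 1 + (((nbrs.filter (fun x => decide (¬ x ∈ p ++ [n]))).map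
              (fun nb => cost g stop f nb (p ++ [n]))).sum)
            ≤ 1 + sumLen g * (sumLen g + 1) ^ (f + 1) := Nat.add_le_add_left hsum _
          _ ≤ (sumLen g + 1) ^ (f + 1) + sumLen g * (sumLen g + 1) ^ (f + 1) :=
              Nat.add_le_add_right (Nat.one_le_pow _ _ (Nat.succ_pos _)) _
          _ = (sumLen g + 1) ^ (f + 2) := by ring

lemma pySetProbeB_eq : ∀ (f j p iv : Nat), pySetProbeB f j p iv = pySetProbe f j p iv := by
  intro f
  induction f with
  | zero => intro j p iv; rfl
  | succ f ih => intro j p iv; simp only [pySetProbeB, pySetProbe]; split <;> simp [ih]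

lemma pyPairListB_eq : pyPairListB = pyPairList := by
  funext v w
  simp only [pyPairListB, pyPairList, pyHashB, pyHash, pySetProbeB_eq]
  rfl

lemma findedgesB_eq (g : List (Int × List Int)) : findedgesB g = findedges g := by
  simp only [findedgesB, findedges, pyPairListB_eq]

lemma run_spec (g : List (Int × List Int)) (stop : Int) :
    ∀ (fA : Nat) (n : Int) (path0 : List Int) (rest : List (Int × List Int)) (fB : Nat),
      pvM g (path0 ++ [n]) ≤ fA →
      runStack g stop (cost g stop fA n path0 + fB) ((n, path0 ++ [n]) :: rest)
        = match findPathA g fA n stop path0 with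
          | some p => some p
          | none => runStack g stop fB rest := by
  intro fA
  induction fA with
  | zero =>
    intro n path0 rest fB hm
    have h1 : cost g stop 0 n path0 + fB = fB + 1 := by simp [cost]; omega
    rw [h1]
    by_cases hstop : n = stop
    · simp [runStack, findPathA, hstop]
    · rw [show findPathA g 0 n stop path0 = none from by simp [findPathA, hstop]]
      cases hg : (PySem.Dict.ofList g).get? n with
      | none =>
        have hc : (PySem.Dict.ofList g).contains n = false := by
          rw [PySem.Dict.contains_eq_isSome_get?, hg]; rfl
        simp only [runStack, hc, if_neg hstop]
        simp
      | some nbrs =>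
        have hc : (PySem.Dict.ofList g).contains n = true := by
          rw [PySem.Dict.contains_eq_isSome_get?, hg]; rfl
        have hgd : (PySem.Dict.ofList g).getD n [] = nbrs := PySem.Dict.getD_of_get?_eq_some _ _ hg
        have hfil : nbrs.filter (fun x => decide (¬ x ∈ path0 ++ [n])) = [] := by
          rw [List.filter_eq_nil_iff]
          intro nb hnb
          simp only [decide_eq_true_eq, Decidable.not_not]
          by_contra hnp
          have hmem : nb ∈ (flatVals g).dedup.filter (fun x => decide (¬ x ∈ path0 ++ [n])) := by
            simp only [List.mem_filter, List.mem_dedup, decide_eq_true_eq]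
            exact ⟨mem_flatVals hg hnb, hnp⟩
          have hlen : 0 < pvM g (path0 ++ [n]) := by
            unfold pvM
            exact List.length_pos_of_mem hmem
          omega
        simp only [runStack, hc, if_neg hstop, hgd, pushRev_eq, hfil, List.map_nil,
          List.nil_append, Bool.true_eq_false, if_false]
  | succ f ih =>
    intro n path0 rest fB hm
    by_cases hstop : n = stop
    · have h1 : cost g stop (f + 1) n path0 + fB = fB + 1 := by simp [cost, hstop]; omega
      rw [h1]
      simp [runStack, findPathA, hstop]
    · cases hg : (PySem.Dict.ofList g).get? n with
      | none =>
        have hc : (PySem.Dict.ofList g).contains n = false := by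
          rw [PySem.Dict.contains_eq_isSome_get?, hg]; rfl
        have h1 : cost g stop (f + 1) n path0 + fB = fB + 1 := by simp [cost, hstop, hg]; omega
        rw [h1]
        rw [show findPathA g (f + 1) n stop path0 = none from by simp [findPathA, hstop, hg]]
        simp only [runStack, hc, if_neg hstop]
        simp
      | some nbrs =>
        have hc : (PySem.Dict.ofList g).contains n = true := by
          rw [PySem.Dict.contains_eq_isSome_get?, hg]; rfl
        have hgd : (PySem.Dict.ofList g).getD n [] = nbrs := PySem.Dict.getD_of_get?_eq_some _ _ hg
        have hsub : ∀ nb ∈ nbrs, nb ∈ flatVals g := fun nb h => mem_flatVals hg h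
        have haux : ∀ (l : List Int), (∀ nb ∈ l, nb ∈ flatVals g) →
            ∀ (rest' : List (Int × List Int)) (fB' : Nat),
            runStack g stop
                (((l.filter (fun x => decide (¬ x ∈ path0 ++ [n]))).map
                  (fun nb => cost g stop f nb (path0 ++ [n]))).sum + fB')
                ((l.filter (fun x => decide (¬ x ∈ path0 ++ [n]))).map
                  (fun nb => (nb, (path0 ++ [n]) ++ [nb])) ++ rest')
              = match l.findSome? (fun node =>
                    if node ∈ path0 ++ [n] then none
                    else findPathA g f node stop (path0 ++ [n])) with
                | some p => some p
                | none => runStack g stop fB' rest' := by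
          intro l
          induction l with
          | nil => intro _ rest' fB'; simp
          | cons a t iht =>
            intro hl rest' fB'
            rw [List.filter_cons, List.findSome?_cons]
            by_cases hap : a ∈ path0 ++ [n]
            · rw [if_neg (by simp [hap] : ¬ (decide (¬ a ∈ path0 ++ [n]) = true)),
                if_pos hap]
              exact iht (fun nb h => hl nb (List.mem_cons_of_mem _ h)) rest' fB'
            · have hma : pvM g ((path0 ++ [n]) ++ [a]) ≤ f := by
                have hlt := pvM_decrease (hl a (List.mem_cons_self ..)) hap
                omega
              rw [if_pos (by simp [hap] : (decide (¬ a ∈ path0 ++ [n]) = true)), if_neg hap,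
                List.map_cons, List.sum_cons, List.map_cons, List.cons_append]
              have harr : cost g stop f a (path0 ++ [n]) +
                  ((t.filter (fun x => decide (¬ x ∈ path0 ++ [n]))).map
                    (fun nb => cost g stop f nb (path0 ++ [n]))).sum + fB'
                  = cost g stop f a (path0 ++ [n]) +
                  (((t.filter (fun x => decide (¬ x ∈ path0 ++ [n]))).map
                    (fun nb => cost g stop f nb (path0 ++ [n]))).sum + fB') := by omega
              rw [harr, ih a (path0 ++ [n]) _ _ hma]
              cases hfa : findPathA g f a stop (path0 ++ [n]) with
              | some p => rfl
              | none => exact iht (fun nb h => hl nb (List.mem_cons_of_mem _ h)) rest' fB'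
        have h1 : cost g stop (f + 1) n path0 + fB
            = (((nbrs.filter (fun x => decide (¬ x ∈ path0 ++ [n]))).map
                (fun nb => cost g stop f nb (path0 ++ [n]))).sum + fB) + 1 := by
          rw [show cost g stop (f + 1) n path0
              = 1 + ((nbrs.filter (fun x => decide (¬ x ∈ path0 ++ [n]))).map
                  (fun nb => cost g stop f nb (path0 ++ [n]))).sum from by
            simp only [cost, if_neg hstop, hg]]
          omega
        rw [h1]
        rw [show findPathA g (f + 1) n stop path0
            = nbrs.findSome? (fun node =>
                if node ∈ path0 ++ [n] then none
                else findPathA g f node stop (path0 ++ [n])) from by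
          simp only [findPathA, if_neg hstop, hg]]
        simp only [runStack, hc, if_neg hstop, hgd, pushRev_eq, Bool.true_eq_false, if_false]
        exact haux nbrs hsub rest fB

lemma findPath_eq (g : List (Int × List Int)) (v stop : Int) :
    findPathB g v stop = findPathA g (sumLen g + 1) v stop [] := by
  have hc : cost g stop (sumLen g + 1) v [] ≤ bigFuel g := by
    calc cost g stop (sumLen g + 1) v []
        ≤ (sumLen g + 1) ^ (sumLen g + 2) := cost_le g stop (sumLen g + 1) v []
      _ ≤ (sumLen g + 2) ^ (sumLen g + 2) := Nat.pow_le_pow_left (by omega) _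
  have hm : pvM g ([] ++ [v]) ≤ sumLen g + 1 := by
    have h1 : pvM g ([] ++ [v]) ≤ (flatVals g).dedup.length := List.length_filter_le _ _
    have h2 : (flatVals g).dedup.length ≤ (flatVals g).length :=
      (List.dedup_sublist _).length_le
    have h3 : (flatVals g).length = sumLen g := rfl
    omega
  have hsplit : bigFuel g = cost g stop (sumLen g + 1) v [] + (bigFuel g - cost g stop (sumLen g + 1) v []) := by omega
  have := run_spec g stop (sumLen g + 1) v [] [] (bigFuel g - cost g stop (sumLen g + 1) v []) hm
  unfold findPathB
  rw [hsplit]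
  simp only [List.nil_append] at this
  rw [this]
  cases hfa : findPathA g (sumLen g + 1) v stop [] <;> simp [runStack_nil]

lemma pyPairList_len (v w : Int) : (pyPairList v w).length ≤ 2 := by
  unfold pyPairList
  by_cases h : v = w
  · simp [h]
  · simp only [h, if_false]
    split_ifs <;> simp

lemma findedges_inner_len (v : Int) :
    ∀ (ws : List Int) (acc : List (List Int)), (∀ e ∈ acc, e.length ≤ 2) →
      ∀ e ∈ ws.foldl (fun edges w =>
          let e := pyPairList v w
          if edges.any (fun e' => e' == e || e' == e.reverse) then edges else edges ++ [e]) acc,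
        e.length ≤ 2 := by
  intro ws
  induction ws with
  | nil => intro acc hacc; simpa using hacc
  | cons w t ihw =>
    intro acc hacc
    rw [List.foldl_cons]
    apply ihw
    intro e he
    dsimp only at he
    split at he
    · exact hacc e he
    · rcases List.mem_append.1 he with h | h
      · exact hacc e h
      · rcases List.mem_singleton.1 h with rfl
        exact pyPairList_len _ _
  
lemma findedges_mem_len (g : List (Int × List Int)) :
    ∀ e ∈ findedges g, e.length ≤ 2 := by
  unfold findedges
  have : ∀ (ks : List Int) (acc : List (List Int)), (∀ e ∈ acc, e.length ≤ 2) →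
      ∀ e ∈ ks.foldl (fun edges v =>
          ((PySem.Dict.ofList g).getD v []).foldl (fun edges w =>
            let e := pyPairList v w
            if edges.any (fun e' => e' == e || e' == e.reverse) then edges else edges ++ [e]) edges) acc,
        e.length ≤ 2 := by
    intro ks
    induction ks with
    | nil => intro acc hacc; simpa using hacc
    | cons k t ihk =>
      intro acc hacc
      rw [List.foldl_cons]
      exact ihk _ (findedges_inner_len k _ acc hacc)
  exact this _ [] (by simp)

-- ===== VERDICT (by name: the statement is the Claim_ definition above) =====
theorem contradictory_cycle_spec : Claim_equal_contradictory_cycle := by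
  intro g1 g2 _
  unfold Spec_contradictory_cycle contradictory_cycle contradictory_cycle_alt
  rw [findedgesB_eq]
  apply findSome?_congr
  intro e he
  by_cases h1 : e.length = 1
  · simp [h1]
  · simp only [h1, if_false]
    match e with
    | [] => rfl
    | [v] => rfl
    | [v, w] =>
      show (if findPathA g1 (sumLen g1 + 1) v w [] ≠ none then findPathA g1 (sumLen g1 + 1) v w [] else none)
          = findPathB g1 v w
      rw [findPath_eq g1 v w]
      cases hA : findPathA g1 (sumLen g1 + 1) v w [] <;> simp [hA]
    | v :: w :: x :: t =>
      have hlen := findedges_mem_len g2 _ he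
      simp at hlen
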